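-- pv_equiv track=rewrite | github.com/TaJIanT/GameGiveawaysPro | main.py | distribute_games
-- ===== SOURCE A (Python) =====
-- def distribute_games(games):
--     discounts, freebies = [], []
--     for g in games:
--         price = (g.get("price") or "").strip().upper()
--         (discounts if (price and price != "FREE") else freebies).append(g)
--
--     distributed = {"all": freebies[:40]}
--     distributed["steam"] = [g for g in freebies if (g.get("platformkey") or "").lower() == "steam"][:40]
--     distributed["epic"] = [g for g in freebies if (g.get("platformkey") or "").lower() == "epicgames"][:40]
--     distributed["gog"] = [g for g in freebies if (g.get("platformkey") or "").lower() == "gog"][:40]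
--     distributed["deals"] = discounts[:80]
--     return distributed
-- ===== SOURCE B (Python) =====
-- def distribute_games(games):
--     # Single pass over games: classify by price and dispatch freebies by platform at once.
--     discounts, freebies, steam, epic, gog = [], [], [], [], []
--     for g in games:
--         price = (g.get("price") or "").strip().upper()
--         if price and price != "FREE":
--             discounts.append(g)
--         else:
--             freebies.append(g)
--             plat = (g.get("platformkey") or "").lower()
--             if plat == "steam":
--                 steam.append(g)
--             elif plat == "epicgames":
--                 epic.append(g)
--             elif plat == "gog":
--                 gog.append(g)
--     return {"all": freebies[:40], "steam": steam[:40], "epic": epic[:40],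
--             "gog": gog[:40], "deals": discounts[:80]}
-- ===== Notes on version B (the rewrite author's own statement) =====
-- stated objective: alternative
-- what changed: A scans the freebie list three more times with one filtered comprehension per platform; B makes a single pass over games that classifies by price and immediately dispatches each freebie into its platform bucket, slicing the caps at the end.
import Mathlib
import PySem

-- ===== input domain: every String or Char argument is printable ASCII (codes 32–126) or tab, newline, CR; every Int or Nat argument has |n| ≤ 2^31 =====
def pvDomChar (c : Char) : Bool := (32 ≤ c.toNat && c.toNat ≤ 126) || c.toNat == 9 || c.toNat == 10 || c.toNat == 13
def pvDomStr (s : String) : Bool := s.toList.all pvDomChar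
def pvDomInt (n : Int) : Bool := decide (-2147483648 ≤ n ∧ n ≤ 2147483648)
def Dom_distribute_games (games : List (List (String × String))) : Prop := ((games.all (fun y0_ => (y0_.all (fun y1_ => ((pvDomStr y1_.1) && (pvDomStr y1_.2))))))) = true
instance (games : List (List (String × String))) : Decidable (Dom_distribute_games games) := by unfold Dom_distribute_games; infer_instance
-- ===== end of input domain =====

-- B replaces A's three per-platform filtered scans of the freebie list with one classify-and-dispatch pass over games (alternative decomposition, same cost class).

-- ===== PORT A =====
-- (g.get("price") or "").strip().upper()  — the only falsy str is "", so `or ""` is getD with default ""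
def pvPriceA (g : List (String × String)) : String :=
  PySem.Str.upper (PySem.Str.strip ((PySem.Dict.mk g).getD "price" ""))

-- (g.get("platformkey") or "").lower()
def pvPlatA (g : List (String × String)) : String :=
  PySem.Str.lower ((PySem.Dict.mk g).getD "platformkey" "")

def distribute_games (games : List (List (String × String))) : List (String × List (List (String × String))) :=
  let p := games.foldl
    (fun (acc : List (List (String × String)) × List (List (String × String))) g =>
      if (pvPriceA g != "" && pvPriceA g != "FREE") then (acc.1 ++ [g], acc.2)
      else (acc.1, acc.2 ++ [g]))
    ([], [])
  let discounts := p.1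
  let freebies := p.2
  [("all", PySem.List.slice freebies none (some 40)),
   ("steam", PySem.List.slice (freebies.filter (fun g => pvPlatA g == "steam")) none (some 40)),
   ("epic", PySem.List.slice (freebies.filter (fun g => pvPlatA g == "epicgames")) none (some 40)),
   ("gog", PySem.List.slice (freebies.filter (fun g => pvPlatA g == "gog")) none (some 40)),
   ("deals", PySem.List.slice discounts none (some 80))]

-- ===== PORT B =====
def pvPriceB (g : List (String × String)) : String :=
  PySem.Str.upper (PySem.Str.strip ((PySem.Dict.mk g).getD "price" ""))

def pvPlatB (g : List (String × String)) : String :=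
  PySem.Str.lower ((PySem.Dict.mk g).getD "platformkey" "")

-- state: (discounts, freebies, steam, epic, gog)
def pvStepB (acc : List (List (String × String)) × List (List (String × String)) × List (List (String × String)) × List (List (String × String)) × List (List (String × String)))
    (g : List (String × String)) :
    List (List (String × String)) × List (List (String × String)) × List (List (String × String)) × List (List (String × String)) × List (List (String × String)) :=
  if (pvPriceB g != "" && pvPriceB g != "FREE") then
    (acc.1 ++ [g], acc.2.1, acc.2.2.1, acc.2.2.2.1, acc.2.2.2.2)
  else
    let plat := pvPlatB g
    if plat == "steam" then
      (acc.1, acc.2.1 ++ [g], acc.2.2.1 ++ [g], acc.2.2.2.1, acc.2.2.2.2)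
    else if plat == "epicgames" then
      (acc.1, acc.2.1 ++ [g], acc.2.2.1, acc.2.2.2.1 ++ [g], acc.2.2.2.2)
    else if plat == "gog" then
      (acc.1, acc.2.1 ++ [g], acc.2.2.1, acc.2.2.2.1, acc.2.2.2.2 ++ [g])
    else
      (acc.1, acc.2.1 ++ [g], acc.2.2.1, acc.2.2.2.1, acc.2.2.2.2)

def distribute_games_alt (games : List (List (String × String))) : List (String × List (List (String × String))) :=
  let s := games.foldl pvStepB ([], [], [], [], [])
  [("all", PySem.List.slice s.2.1 none (some 40)),
   ("steam", PySem.List.slice s.2.2.1 none (some 40)),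
   ("epic", PySem.List.slice s.2.2.2.1 none (some 40)),
   ("gog", PySem.List.slice s.2.2.2.2 none (some 40)),
   ("deals", PySem.List.slice s.1 none (some 80))]

-- ===== PRECONDITION & SPEC =====
def Spec_distribute_games (games : List (List (String × String))) (out : List (String × List (List (String × String)))) : Prop := out = distribute_games_alt games
instance (games : List (List (String × String))) (out : List (String × List (List (String × String)))) : Decidable (Spec_distribute_games games out) := by unfold Spec_distribute_games; infer_instance

-- ===== CLAIM (what is proved, stated in full; the proofs are below) =====
def Claim_equal_distribute_games : Prop := ∀ (games : List (List (String × String))), Dom_distribute_games games → Spec_distribute_games games (distribute_games games)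

-- ===== LEMMAS AND PROOFS =====

-- A's split loop, with a generic predicate so that simp leaves the condition opaque.
theorem pvFoldA (p : List (String × String) → Bool) (games : List (List (String × String)))
    (d f : List (List (String × String))) :
    games.foldl
      (fun (acc : List (List (String × String)) × List (List (String × String))) g =>
        if p g then (acc.1 ++ [g], acc.2) else (acc.1, acc.2 ++ [g])) (d, f)
    = (d ++ games.filter p, f ++ games.filter (fun g => !p g)) := by
  induction games generalizing d f with
  | nil => simp
  | cons g gs ih =>
    cases h : p g <;> simp [List.foldl_cons, h, ih]

-- B's classify-and-dispatch step, with generic predicates.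
def pvGStep (p q1 q2 q3 : List (String × String) → Bool)
    (acc : List (List (String × String)) × List (List (String × String)) × List (List (String × String)) × List (List (String × String)) × List (List (String × String)))
    (g : List (String × String)) :
    List (List (String × String)) × List (List (String × String)) × List (List (String × String)) × List (List (String × String)) × List (List (String × String)) :=
  if p g then
    (acc.1 ++ [g], acc.2.1, acc.2.2.1, acc.2.2.2.1, acc.2.2.2.2)
  else if q1 g then
    (acc.1, acc.2.1 ++ [g], acc.2.2.1 ++ [g], acc.2.2.2.1, acc.2.2.2.2)
  else if q2 g then
    (acc.1, acc.2.1 ++ [g], acc.2.2.1, acc.2.2.2.1 ++ [g], acc.2.2.2.2)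
  else if q3 g then
    (acc.1, acc.2.1 ++ [g], acc.2.2.1, acc.2.2.2.1, acc.2.2.2.2 ++ [g])
  else
    (acc.1, acc.2.1 ++ [g], acc.2.2.1, acc.2.2.2.1, acc.2.2.2.2)

theorem pvStepB_eq : pvStepB = pvGStep
    (fun g => pvPriceB g != "" && pvPriceB g != "FREE")
    (fun g => pvPlatB g == "steam")
    (fun g => pvPlatB g == "epicgames")
    (fun g => pvPlatB g == "gog") := rfl

theorem pvFoldB (p q1 q2 q3 : List (String × String) → Bool)
    (games : List (List (String × String)))
    (d f s e g0 : List (List (String × String))) :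
    games.foldl (pvGStep p q1 q2 q3) (d, f, s, e, g0)
    = (d ++ games.filter p,
       f ++ games.filter (fun g => !p g),
       s ++ games.filter (fun g => !p g && q1 g),
       e ++ games.filter (fun g => !p g && !q1 g && q2 g),
       g0 ++ games.filter (fun g => !p g && !q1 g && !q2 g && q3 g)) := by
  induction games generalizing d f s e g0 with
  | nil => simp
  | cons g gs ih =>
    cases h : p g
    · cases h1 : q1 g
      · cases h2 : q2 g
        · cases h3 : q3 g <;>
            simp [List.foldl_cons, pvGStep, h, h1, h2, h3, ih]
        · simp [List.foldl_cons, pvGStep, h, h1, h2, ih]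
      · simp [List.foldl_cons, pvGStep, h, h1, ih]
    · simp [List.foldl_cons, pvGStep, h, ih]

-- A's per-platform scans: a filter of the freebie filter is one combined filter.
theorem pvFilterPlat (p q : List (String × String) → Bool)
    (games : List (List (String × String))) :
    (games.filter (fun g => !p g)).filter q
    = games.filter (fun g => !p g && q g) := by
  rw [List.filter_filter]
  exact List.filter_congr (fun g _ => by cases p g <;> cases q g <;> simp)

-- drop one redundant negated test from a conjunction when the last conjunct excludes it
theorem pvDrop1 (p q1 q2 : List (String × String) → Bool)
    (games : List (List (String × String)))
    (h : ∀ g, q2 g = true → q1 g = false) :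
    games.filter (fun g => !p g && !q1 g && q2 g)
    = games.filter (fun g => !p g && q2 g) := by
  refine List.filter_congr (fun g _ => ?_)
  cases h2 : q2 g
  · simp
  · simp [h g h2]

theorem pvDrop2 (p q1 q2 q3 : List (String × String) → Bool)
    (games : List (List (String × String)))
    (h1 : ∀ g, q3 g = true → q1 g = false)
    (h2 : ∀ g, q3 g = true → q2 g = false) :
    games.filter (fun g => !p g && !q1 g && !q2 g && q3 g)
    = games.filter (fun g => !p g && q3 g) := by
  refine List.filter_congr (fun g _ => ?_)
  cases h3 : q3 g
  · simp
  · simp [h1 g h3, h2 g h3]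

-- ===== VERDICT (by name: the statement is the Claim_ definition above) =====
theorem distribute_games_spec : Claim_equal_distribute_games := by
  intro games _
  show distribute_games games = distribute_games_alt games
  unfold distribute_games distribute_games_alt
  rw [pvStepB_eq, pvFoldA, pvFoldB]
  have hpr : pvPriceB = pvPriceA := rfl
  have hpl : pvPlatB = pvPlatA := rfl
  simp only [hpr, hpl, List.nil_append]
  rw [pvFilterPlat _ (fun g => pvPlatA g == "steam") games,
    pvFilterPlat _ (fun g => pvPlatA g == "epicgames") games,
    pvFilterPlat _ (fun g => pvPlatA g == "gog") games,
    pvDrop1 _ (fun g => pvPlatA g == "steam") (fun g => pvPlatA g == "epicgames") games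
      (fun g hg => by simp_all),
    pvDrop2 _ (fun g => pvPlatA g == "steam") (fun g => pvPlatA g == "epicgames")
      (fun g => pvPlatA g == "gog") games
      (fun g hg => by simp_all) (fun g hg => by simp_all)]
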